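-- pv_equiv track=rewrite | github.com/pbrown94949/advent-2024 | day12/solution2.py | count_edges_by_col
-- ===== SOURCE A (Python) =====
-- def count_edges_by_col(col, rows, region):
--     """Count all edges between the specified column and the column to its west."""
--     result = 0
--     prior_edge_indicator = (False, False)
--     for row in range(min(rows), max(rows) + 1):
--         east, west = (row, col), (row, col - 1)
--         edge_indicator = (east in region, west in region)
--         if is_new_edge(edge_indicator, prior_edge_indicator):
--             result += 1
--         prior_edge_indicator = edge_indicator
--     return result
--
-- def is_new_edge(edge_indicator, prior_edge_indicator):
--     """For two adjacent plots, if one is inside the region and one is outside the region, then there is an edge between them.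
--     If the two plots have a different relationship than the prior pair we looked at, then this is a new edge that hasn't been counted yet."""
--     return any(edge_indicator) and not all(edge_indicator) and edge_indicator != prior_edge_indicator
-- ===== SOURCE B (Python) =====
-- def count_runs(xs):
--     runs, prev = 0, None
--     for x in xs:
--         if prev is None or x - prev > 1:
--             runs += 1
--         prev = x
--     return runs
--
--
-- def count_edges_by_col(col, rows, region):
--     """Count all edges between the specified column and the column to its west."""
--     lo, hi = min(rows), max(rows)
--     east = [r for r in range(lo, hi + 1) if (r, col) in region and (r, col - 1) not in region]
--     west = [r for r in range(lo, hi + 1) if (r, col - 1) in region and (r, col) not in region]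
--     return count_runs(east) + count_runs(west)
-- ===== Notes on version B (the rewrite author's own statement) =====
-- stated objective: alternative
-- what changed: Replaces the single ordered scan that tracks the prior orientation pair with two independent filtered row lists (east-facing and west-facing boundary rows) whose maximal runs of consecutive integers are counted separately and summed.
import Mathlib
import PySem

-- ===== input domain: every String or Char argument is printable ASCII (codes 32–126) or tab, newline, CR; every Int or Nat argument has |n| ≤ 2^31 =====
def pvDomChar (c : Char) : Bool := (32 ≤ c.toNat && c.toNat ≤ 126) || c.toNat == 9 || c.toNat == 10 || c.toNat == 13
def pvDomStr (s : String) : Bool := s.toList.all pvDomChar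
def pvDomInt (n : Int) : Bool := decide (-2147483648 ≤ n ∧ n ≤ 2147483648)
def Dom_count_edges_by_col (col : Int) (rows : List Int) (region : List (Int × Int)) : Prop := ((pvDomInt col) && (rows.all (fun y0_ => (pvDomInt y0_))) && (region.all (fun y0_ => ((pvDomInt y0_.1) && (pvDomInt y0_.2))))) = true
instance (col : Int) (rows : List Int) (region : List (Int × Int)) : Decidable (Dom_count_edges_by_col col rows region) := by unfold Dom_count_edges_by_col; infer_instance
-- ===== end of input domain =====

-- B replaces A's ordered scan with prior-orientation tracking by two independent
-- filtered row lists whose maximal consecutive runs are counted and summed (objective: alternative).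

-- ===== PORT A =====
def pvIsNewEdge (edge_indicator prior_edge_indicator : Bool × Bool) : Bool :=
  (edge_indicator.1 || edge_indicator.2) && !(edge_indicator.1 && edge_indicator.2)
    && decide (edge_indicator ≠ prior_edge_indicator)

def count_edges_by_col (col : Int) (rows : List Int) (region : List (Int × Int)) : Int :=
  let lo := (PySem.List.min? rows (fun x => x)).getD 0
  let hi := (PySem.List.max? rows (fun x => x)).getD 0
  ((PySem.List.pyRange lo (hi + 1) 1).foldl
    (fun (st : Int × (Bool × Bool)) row =>
      (if pvIsNewEdge (region.contains (row, col), region.contains (row, col - 1)) st.2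
       then st.1 + 1 else st.1,
       (region.contains (row, col), region.contains (row, col - 1))))
    (0, (false, false))).1

-- ===== PORT B =====
def pvRunStep (st : Int × Option Int) (x : Int) : Int × Option Int :=
  (if (match st.2 with
       | none => true
       | some p => decide (x - p > 1)) then st.1 + 1 else st.1, some x)

def pvCountRuns (xs : List Int) : Int := (xs.foldl pvRunStep (0, none)).1

def count_edges_by_col_alt (col : Int) (rows : List Int) (region : List (Int × Int)) : Int :=
  let lo := (PySem.List.min? rows (fun x => x)).getD 0
  let hi := (PySem.List.max? rows (fun x => x)).getD 0
  let east := (PySem.List.pyRange lo (hi + 1) 1).filter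
      (fun r => region.contains (r, col) && !region.contains (r, col - 1))
  let west := (PySem.List.pyRange lo (hi + 1) 1).filter
      (fun r => region.contains (r, col - 1) && !region.contains (r, col))
  pvCountRuns east + pvCountRuns west

-- ===== PRECONDITION & SPEC =====
-- Pre_ excludes only rows = [], on which Python A raises ValueError (min of empty sequence).
def Pre_count_edges_by_col (col : Int) (rows : List Int) (region : List (Int × Int)) : Prop :=
  rows ≠ []
instance (col : Int) (rows : List Int) (region : List (Int × Int)) : Decidable (Pre_count_edges_by_col col rows region) := by unfold Pre_count_edges_by_col; infer_instance

def pvWitness_count_edges_by_col : Int × List Int × (List (Int × Int)) := (0, [0, 2], [(0, 0), (2, 0)])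

def Spec_count_edges_by_col (col : Int) (rows : List Int) (region : List (Int × Int)) (out : Int) : Prop := out = count_edges_by_col_alt col rows region
instance (col : Int) (rows : List Int) (region : List (Int × Int)) (out : Int) : Decidable (Spec_count_edges_by_col col rows region out) := by unfold Spec_count_edges_by_col; infer_instance

-- ===== CLAIM (what is proved, stated in full; the proofs are below) =====
def Claim_equal_count_edges_by_col : Prop := ∀ (col : Int) (rows : List Int) (region : List (Int × Int)), Dom_count_edges_by_col col rows region → Pre_count_edges_by_col col rows region → Spec_count_edges_by_col col rows region (count_edges_by_col col rows region)

-- ===== LEMMAS AND PROOFS =====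

-- head-step evaluation lemmas (used by pv_main)
lemma pvne_same (b : Bool) (p : Bool × Bool) : pvIsNewEdge (b, b) p = false := by
  cases b <;> simp [pvIsNewEdge]

lemma pvne_eq (e p : Bool × Bool) (h : p = e) : pvIsNewEdge e p = false := by
  simp [pvIsNewEdge, h]

lemma pvne_ft (p : Bool × Bool) (h : p ≠ (false, true)) : pvIsNewEdge (false, true) p = true := by
  simp only [pvIsNewEdge, Bool.false_or, Bool.true_or, Bool.false_and, Bool.not_false,
    Bool.true_and, decide_eq_true_iff]
  exact fun hh => h hh.symm

lemma pvne_tf (p : Bool × Bool) (h : p ≠ (true, false)) : pvIsNewEdge (true, false) p = true := by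
  simp only [pvIsNewEdge, Bool.true_or, Bool.and_false, Bool.not_false, Bool.true_and,
    decide_eq_true_iff]
  exact fun hh => h hh.symm

-- Main invariant: scanning rows a..b-1, A's prior-indicator fold equals the sum of the
-- two run-count folds over the east- and west-filtered row lists, given the invariants
-- linking the prior indicator p with the last seen east row qe and west row qw.
lemma pv_main (col : Int) (region : List (Int × Int)) :
    ∀ (n : Nat) (a b : Int), (b - a).toNat = n →
    ∀ (p : Bool × Bool) (qe qw : Option Int) (accA accE accW : Int),
    (∀ q, qe = some q → q < a) →
    ((p ≠ (true, false)) ↔ ∀ q, qe = some q → a - q > 1) →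
    (∀ q, qw = some q → q < a) →
    ((p ≠ (false, true)) ↔ ∀ q, qw = some q → a - q > 1) →
    ((PySem.List.pyRange a b 1).foldl
      (fun (st : Int × (Bool × Bool)) row =>
        (if pvIsNewEdge (region.contains (row, col), region.contains (row, col - 1)) st.2
         then st.1 + 1 else st.1,
         (region.contains (row, col), region.contains (row, col - 1)))) (accA, p)).1
      + accE + accW
    = accA
      + (((PySem.List.pyRange a b 1).filter
           (fun r => region.contains (r, col) && !region.contains (r, col - 1))).foldl pvRunStep (accE, qe)).1
      + (((PySem.List.pyRange a b 1).filter
           (fun r => region.contains (r, col - 1) && !region.contains (r, col))).foldl pvRunStep (accW, qw)).1 := by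
  intro n
  induction n with
  | zero =>
      intro a b hn p qe qw accA accE accW _ _ _ _
      rw [PySem.List.pyRange_one_eq_nil (by omega)]
      simp only [List.foldl_nil, List.filter_nil]
  | succ m ih =>
      intro a b hn p qe qw accA accE accW he1 he2 hw1 hw2
      rw [PySem.List.pyRange_one_cons (by omega)]
      simp only [List.foldl_cons, List.filter_cons]
      cases hc1 : region.contains (a, col) <;> cases hc2 : region.contains (a, col - 1) <;>
        simp only [Bool.false_and, Bool.and_false, Bool.true_and, Bool.and_true,
          Bool.not_false, Bool.not_true, Bool.false_eq_true, if_false, eq_self_iff_true, if_true]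
      · -- (false, false): no edge, neither filter picks a
        rw [pvne_same false p]
        simp only [Bool.false_eq_true, if_false]
        have H := ih (a + 1) b (by omega) (false, false) qe qw accA accE accW
          (fun q h => by have := he1 q h; omega)
          ⟨fun _ q h => by have := he1 q h; omega, fun _ => by decide⟩
          (fun q h => by have := hw1 q h; omega)
          ⟨fun _ q h => by have := hw1 q h; omega, fun _ => by decide⟩
        omega
      · -- (false, true): west edge row
        by_cases hp : p = (false, true)
        · have hstep : pvRunStep (accW, qw) a = (accW, some a) := by
            cases qw with
            | none => exact absurd (hw2.mpr (fun q h => nomatch h)) (by simp [hp])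
            | some q =>
                have hle : ¬ (a - q > 1) :=
                  fun hgt => absurd (hw2.mpr (fun q' h' => by cases h'; omega)) (by simp [hp])
                simp [pvRunStep, hle]
          rw [pvne_eq (false, true) p hp, List.foldl_cons, hstep]
          simp only [Bool.false_eq_true, if_false]
          have H := ih (a + 1) b (by omega) (false, true) qe (some a) accA accE accW
            (fun q h => by have := he1 q h; omega)
            ⟨fun _ q h => by have := he1 q h; omega, fun _ => by decide⟩
            (fun q h => by injection h with h'; omega)
            ⟨fun h => absurd rfl h, fun hAll => absurd (hAll a rfl) (by omega)⟩
          omega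
        · have hstep : pvRunStep (accW, qw) a = (accW + 1, some a) := by
            cases qw with
            | none => simp [pvRunStep]
            | some q =>
                have hgt : a - q > 1 := hw2.mp hp q rfl
                simp [pvRunStep, hgt]
          rw [pvne_ft p hp, List.foldl_cons, hstep]
          simp only [Bool.false_eq_true, if_false, if_pos trivial]
          have H := ih (a + 1) b (by omega) (false, true) qe (some a) (accA + 1) accE (accW + 1)
            (fun q h => by have := he1 q h; omega)
            ⟨fun _ q h => by have := he1 q h; omega, fun _ => by decide⟩
            (fun q h => by injection h with h'; omega)
            ⟨fun h => absurd rfl h, fun hAll => absurd (hAll a rfl) (by omega)⟩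
          omega
      · -- (true, false): east edge row
        by_cases hp : p = (true, false)
        · have hstep : pvRunStep (accE, qe) a = (accE, some a) := by
            cases qe with
            | none => exact absurd (he2.mpr (fun q h => nomatch h)) (by simp [hp])
            | some q =>
                have hle : ¬ (a - q > 1) :=
                  fun hgt => absurd (he2.mpr (fun q' h' => by cases h'; omega)) (by simp [hp])
                simp [pvRunStep, hle]
          rw [pvne_eq (true, false) p hp, List.foldl_cons, hstep]
          simp only [Bool.false_eq_true, if_false]
          have H := ih (a + 1) b (by omega) (true, false) (some a) qw accA accE accW
            (fun q h => by injection h with h'; omega)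
            ⟨fun h => absurd rfl h, fun hAll => absurd (hAll a rfl) (by omega)⟩
            (fun q h => by have := hw1 q h; omega)
            ⟨fun _ q h => by have := hw1 q h; omega, fun _ => by decide⟩
          omega
        · have hstep : pvRunStep (accE, qe) a = (accE + 1, some a) := by
            cases qe with
            | none => simp [pvRunStep]
            | some q =>
                have hgt : a - q > 1 := he2.mp hp q rfl
                simp [pvRunStep, hgt]
          rw [pvne_tf p hp, List.foldl_cons, hstep]
          simp only [Bool.false_eq_true, if_false, if_pos trivial]
          have H := ih (a + 1) b (by omega) (true, false) (some a) qw (accA + 1) (accE + 1) accW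
            (fun q h => by injection h with h'; omega)
            ⟨fun h => absurd rfl h, fun hAll => absurd (hAll a rfl) (by omega)⟩
            (fun q h => by have := hw1 q h; omega)
            ⟨fun _ q h => by have := hw1 q h; omega, fun _ => by decide⟩
          omega
      · -- (true, true): interior, no edge
        rw [pvne_same true p]
        simp only [Bool.false_eq_true, if_false]
        have H := ih (a + 1) b (by omega) (true, true) qe qw accA accE accW
          (fun q h => by have := he1 q h; omega)
          ⟨fun _ q h => by have := he1 q h; omega, fun _ => by decide⟩
          (fun q h => by have := hw1 q h; omega)
          ⟨fun _ q h => by have := hw1 q h; omega, fun _ => by decide⟩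
        omega

-- ===== VERDICT (by name: the statement is the Claim_ definition above) =====
theorem count_edges_by_col_spec : Claim_equal_count_edges_by_col := by
  intro col rows region _ _
  unfold Spec_count_edges_by_col
  simp only [count_edges_by_col, count_edges_by_col_alt, pvCountRuns]
  have H := pv_main col region
    ((((PySem.List.max? rows (fun x => x)).getD 0 + 1) - (PySem.List.min? rows (fun x => x)).getD 0)).toNat
    ((PySem.List.min? rows (fun x => x)).getD 0)
    ((PySem.List.max? rows (fun x => x)).getD 0 + 1) rfl
    (false, false) none none 0 0 0
    (fun q h => by cases h)
    (Iff.intro (fun _ q h => by cases h) (fun _ => by decide))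
    (fun q h => by cases h)
    (Iff.intro (fun _ q h => by cases h) (fun _ => by decide))
  omega
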